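-- pv_equiv track=rewrite | github.com/hkassaei/docker_open5gs | operate/agentic_chaos/recorder.py | _infer_failure_domain
-- ===== SOURCE A (Python) =====
-- def _infer_failure_domain(scenario: dict) -> str:
--     """Infer the failure domain from the scenario's targets."""
--     targets = set()
--     for f in scenario.get("faults", []):
--         targets.add(f.get("target", ""))
--
--     ims_nfs = {"pcscf", "icscf", "scscf", "pyhss", "rtpengine"}
--     core_nfs = {"amf", "smf", "upf", "nrf", "scp", "ausf", "udm", "udr", "pcf"}
--     data_nfs = {"mongo", "mysql", "dns"}
--
--     if targets & ims_nfs: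
--         return "ims_signaling"
--     if targets & {"upf", "nr_gnb"}:
--         return "data_plane"
--     if targets & core_nfs:
--         return "core_control_plane"
--     if targets & data_nfs:
--         return "data_layer"
--     return "unknown"
-- ===== SOURCE B (Python) =====
-- _PRIORITY_TABLE = (
--     ("ims_signaling", ("pcscf", "icscf", "scscf", "pyhss", "rtpengine")),
--     ("data_plane", ("upf", "nr_gnb")),
--     ("core_control_plane", ("amf", "smf", "upf", "nrf", "scp", "ausf", "udm", "udr", "pcf")),
--     ("data_layer", ("mongo", "mysql", "dns")),
-- )
--
-- _NF_INDEX = {}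
-- for _prio, (_label, _names) in enumerate(_PRIORITY_TABLE):
--     for _name in _names:
--         _NF_INDEX.setdefault(_name, (_prio, _label))
--
--
-- def _infer_failure_domain(scenario: dict) -> str:
--     """Infer the failure domain from the scenario's targets."""
--     best = (len(_PRIORITY_TABLE), "unknown")
--     for f in scenario.get("faults", []):
--         hit = _NF_INDEX.get(f.get("target", ""))
--         if hit is not None and hit[0] < best[0]:
--             best = hit
--     return best[1]
-- ===== Notes on version B (the rewrite author's own statement) =====
-- stated objective: alternative
-- what changed: A builds a set of targets and tests it against four NF sets in priority order; B precomputes one name->(priority,label) index from the priority table and takes a single min-priority pass over the fault targets, returning the best label or 'unknown'.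
import Mathlib
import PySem

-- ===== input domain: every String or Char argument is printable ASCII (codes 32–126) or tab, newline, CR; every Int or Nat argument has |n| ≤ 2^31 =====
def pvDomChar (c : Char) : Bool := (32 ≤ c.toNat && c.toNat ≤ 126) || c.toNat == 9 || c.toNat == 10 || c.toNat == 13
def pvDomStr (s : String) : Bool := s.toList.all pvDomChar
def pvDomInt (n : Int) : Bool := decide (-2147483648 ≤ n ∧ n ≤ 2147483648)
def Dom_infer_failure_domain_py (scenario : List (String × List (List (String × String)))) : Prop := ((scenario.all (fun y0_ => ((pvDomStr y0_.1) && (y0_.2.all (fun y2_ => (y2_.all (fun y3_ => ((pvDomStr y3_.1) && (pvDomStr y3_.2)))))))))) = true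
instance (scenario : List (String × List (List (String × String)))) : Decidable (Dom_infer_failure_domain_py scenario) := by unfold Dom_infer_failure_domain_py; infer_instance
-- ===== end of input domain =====

-- B replaces A's four set intersections by a precomputed name→(priority, label) index and a single min-priority pass over the fault targets (objective: alternative decomposition, same cost).

-- ===== PORT A =====
def infer_failure_domain_py (scenario : List (String × List (List (String × String)))) : String :=
  let targets : PySem.Set String :=
    (PySem.Dict.getD (PySem.Dict.mk scenario) "faults" []).foldl
      (fun s f => PySem.Set.add s (PySem.Dict.getD (PySem.Dict.mk f) "target" ""))
      PySem.Set.empty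
  let ims_nfs : PySem.Set String := PySem.Set.ofList ["pcscf", "icscf", "scscf", "pyhss", "rtpengine"]
  let core_nfs : PySem.Set String := PySem.Set.ofList ["amf", "smf", "upf", "nrf", "scp", "ausf", "udm", "udr", "pcf"]
  let data_nfs : PySem.Set String := PySem.Set.ofList ["mongo", "mysql", "dns"]
  if PySem.Set.inter targets ims_nfs ≠ [] then "ims_signaling"
  else if PySem.Set.inter targets (PySem.Set.ofList ["upf", "nr_gnb"]) ≠ [] then "data_plane"
  else if PySem.Set.inter targets core_nfs ≠ [] then "core_control_plane"
  else if PySem.Set.inter targets data_nfs ≠ [] then "data_layer"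
  else "unknown"

-- ===== PORT B =====
def pvTable : List (String × List String) :=
  [("ims_signaling", ["pcscf", "icscf", "scscf", "pyhss", "rtpengine"]),
   ("data_plane", ["upf", "nr_gnb"]),
   ("core_control_plane", ["amf", "smf", "upf", "nrf", "scp", "ausf", "udm", "udr", "pcf"]),
   ("data_layer", ["mongo", "mysql", "dns"])]

def pvIndex : PySem.Dict String (Int × String) :=
  (PySem.List.enumerate pvTable).foldl
    (fun d p => p.2.2.foldl (fun d name => d.setdefault name (p.1, p.2.1)) d)
    PySem.Dict.empty

def infer_failure_domain_py_alt (scenario : List (String × List (List (String × String)))) : String :=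
  let best :=
    (PySem.Dict.getD (PySem.Dict.mk scenario) "faults" []).foldl
      (fun best f =>
        match pvIndex.get? (PySem.Dict.getD (PySem.Dict.mk f) "target" "") with
        | some hit => if hit.1 < best.1 then hit else best
        | none => best)
      ((pvTable.length : Int), "unknown")
  best.2

-- ===== PRECONDITION & SPEC =====
def Spec_infer_failure_domain_py (scenario : List (String × List (List (String × String)))) (out : String) : Prop := out = infer_failure_domain_py_alt scenario
instance (scenario : List (String × List (List (String × String)))) (out : String) : Decidable (Spec_infer_failure_domain_py scenario out) := by unfold Spec_infer_failure_domain_py; infer_instance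

-- ===== CLAIM (what is proved, stated in full; the proofs are below) =====
def Claim_equal_infer_failure_domain_py : Prop := ∀ (scenario : List (String × List (List (String × String)))), Dom_infer_failure_domain_py scenario → Spec_infer_failure_domain_py scenario (infer_failure_domain_py scenario)

-- ===== LEMMAS AND PROOFS =====

-- priority rank of a single target name, and the label of a rank
def pvRk (t : String) : Int :=
  if t ∈ ["pcscf", "icscf", "scscf", "pyhss", "rtpengine"] then 0
  else if t ∈ ["upf", "nr_gnb"] then 1
  else if t ∈ ["amf", "smf", "upf", "nrf", "scp", "ausf", "udm", "udr", "pcf"] then 2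
  else if t ∈ ["mongo", "mysql", "dns"] then 3
  else 4

def pvLab (r : Int) : String :=
  if r = 0 then "ims_signaling"
  else if r = 1 then "data_plane"
  else if r = 2 then "core_control_plane"
  else if r = 3 then "data_layer"
  else "unknown"

lemma pvIndex_eq : pvIndex = PySem.Dict.mk
  [("pcscf", (0, "ims_signaling")), ("icscf", (0, "ims_signaling")), ("scscf", (0, "ims_signaling")),
   ("pyhss", (0, "ims_signaling")), ("rtpengine", (0, "ims_signaling")),
   ("upf", (1, "data_plane")), ("nr_gnb", (1, "data_plane")),
   ("amf", (2, "core_control_plane")), ("smf", (2, "core_control_plane")), ("nrf", (2, "core_control_plane")),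
   ("scp", (2, "core_control_plane")), ("ausf", (2, "core_control_plane")), ("udm", (2, "core_control_plane")),
   ("udr", (2, "core_control_plane")), ("pcf", (2, "core_control_plane")),
   ("mongo", (3, "data_layer")), ("mysql", (3, "data_layer")), ("dns", (3, "data_layer"))] := by decide

-- target of a fault dict (proof-side abbreviation; the ports inline this expression)
def pvTgt (f : List (String × String)) : String := PySem.Dict.getD (PySem.Dict.mk f) "target" ""

-- running minimum of priority ranks
def pvF (L : List String) (r : Int) : Int := L.foldl (fun b t => min b (pvRk t)) r

lemma pvRk_nonneg (t : String) : 0 ≤ pvRk t := by unfold pvRk; split_ifs <;> omega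

lemma pvRk_le4 (t : String) : pvRk t ≤ 4 := by unfold pvRk; split_ifs <;> omega

lemma pvIndex_get (t : String) :
    pvIndex.get? t = if pvRk t < 4 then some (pvRk t, pvLab (pvRk t)) else none := by
  rw [pvIndex_eq]
  simp only [PySem.Dict.get?_mk_cons, beq_iff_eq]
  by_cases h0 : t = "pcscf"
  · subst h0; decide
  rw [if_neg (fun e => h0 e.symm)]
  by_cases h1 : t = "icscf"
  · subst h1; decide
  rw [if_neg (fun e => h1 e.symm)]
  by_cases h2 : t = "scscf"
  · subst h2; decide
  rw [if_neg (fun e => h2 e.symm)]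
  by_cases h3 : t = "pyhss"
  · subst h3; decide
  rw [if_neg (fun e => h3 e.symm)]
  by_cases h4 : t = "rtpengine"
  · subst h4; decide
  rw [if_neg (fun e => h4 e.symm)]
  by_cases h5 : t = "upf"
  · subst h5; decide
  rw [if_neg (fun e => h5 e.symm)]
  by_cases h6 : t = "nr_gnb"
  · subst h6; decide
  rw [if_neg (fun e => h6 e.symm)]
  by_cases h7 : t = "amf"
  · subst h7; decide
  rw [if_neg (fun e => h7 e.symm)]
  by_cases h8 : t = "smf"
  · subst h8; decide
  rw [if_neg (fun e => h8 e.symm)]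
  by_cases h9 : t = "nrf"
  · subst h9; decide
  rw [if_neg (fun e => h9 e.symm)]
  by_cases h10 : t = "scp"
  · subst h10; decide
  rw [if_neg (fun e => h10 e.symm)]
  by_cases h11 : t = "ausf"
  · subst h11; decide
  rw [if_neg (fun e => h11 e.symm)]
  by_cases h12 : t = "udm"
  · subst h12; decide
  rw [if_neg (fun e => h12 e.symm)]
  by_cases h13 : t = "udr"
  · subst h13; decide
  rw [if_neg (fun e => h13 e.symm)]
  by_cases h14 : t = "pcf"
  · subst h14; decide
  rw [if_neg (fun e => h14 e.symm)]
  by_cases h15 : t = "mongo"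
  · subst h15; decide
  rw [if_neg (fun e => h15 e.symm)]
  by_cases h16 : t = "mysql"
  · subst h16; decide
  rw [if_neg (fun e => h16 e.symm)]
  by_cases h17 : t = "dns"
  · subst h17; decide
  rw [if_neg (fun e => h17 e.symm)]
  simp only [PySem.Dict.get?]
  unfold pvRk
  simp_all [List.mem_cons]

lemma pvRk0_of_ims (t : String) (h : t ∈ ["pcscf", "icscf", "scscf", "pyhss", "rtpengine"]) :
    pvRk t = 0 := by
  simp only [List.mem_cons, List.not_mem_nil, or_false] at h
  rcases h with rfl | rfl | rfl | rfl | rfl <;> decide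

lemma pvRk1_of_dp (t : String) (h : t ∈ ["upf", "nr_gnb"]) : pvRk t = 1 := by
  simp only [List.mem_cons, List.not_mem_nil, or_false] at h
  rcases h with rfl | rfl <;> decide

lemma pvRk_core (t : String) (h : t ∈ ["amf", "smf", "upf", "nrf", "scp", "ausf", "udm", "udr", "pcf"]) :
    pvRk t = 1 ∨ pvRk t = 2 := by
  simp only [List.mem_cons, List.not_mem_nil, or_false] at h
  rcases h with rfl | rfl | rfl | rfl | rfl | rfl | rfl | rfl | rfl <;> decide

lemma pvRk3_of_data (t : String) (h : t ∈ ["mongo", "mysql", "dns"]) : pvRk t = 3 := by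
  simp only [List.mem_cons, List.not_mem_nil, or_false] at h
  rcases h with rfl | rfl | rfl <;> decide

lemma pv_ims_of_rk0 (t : String) (h : pvRk t = 0) :
    t ∈ ["pcscf", "icscf", "scscf", "pyhss", "rtpengine"] := by
  unfold pvRk at h; split_ifs at h with a b c d
  · exact a
  all_goals omega

lemma pv_dp_of_rk1 (t : String) (h : pvRk t = 1) : t ∈ ["upf", "nr_gnb"] := by
  unfold pvRk at h; split_ifs at h with a b c d
  · omega
  · exact b
  all_goals omega

lemma pv_core_of_rk2 (t : String) (h : pvRk t = 2) :
    t ∈ ["amf", "smf", "upf", "nrf", "scp", "ausf", "udm", "udr", "pcf"] := by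
  unfold pvRk at h; split_ifs at h with a b c d
  · omega
  · omega
  · exact c
  all_goals omega

lemma pv_data_of_rk3 (t : String) (h : pvRk t = 3) : t ∈ ["mongo", "mysql", "dns"] := by
  unfold pvRk at h; split_ifs at h with a b c d
  · omega
  · omega
  · omega
  · exact d
  omega

lemma pvF_cons (t : String) (L : List String) (r : Int) :
    pvF (t :: L) r = pvF L (min r (pvRk t)) := rfl

lemma pvF_le_init (L : List String) (r : Int) : pvF L r ≤ r := by
  induction L generalizing r with
  | nil => simp [pvF]
  | cons t L ih =>
    rw [pvF_cons]
    exact le_trans (ih _) (min_le_left _ _)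

lemma pvF_nonneg (L : List String) (r : Int) (h : 0 ≤ r) : 0 ≤ pvF L r := by
  induction L generalizing r with
  | nil => simpa [pvF] using h
  | cons t L ih =>
    rw [pvF_cons]
    exact ih _ (le_min h (pvRk_nonneg t))

lemma pvF_le_of_mem (L : List String) (r : Int) (t : String) (h : t ∈ L) :
    pvF L r ≤ pvRk t := by
  revert h
  induction L generalizing r with
  | nil => intro h; cases h
  | cons u L ih =>
    intro h
    rw [pvF_cons]
    rcases List.mem_cons.mp h with rfl | hm
    · exact le_trans (pvF_le_init _ _) (min_le_right _ _)
    · exact ih _ hm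

lemma pvF_cases (L : List String) (r : Int) :
    pvF L r = r ∨ ∃ t ∈ L, pvF L r = pvRk t := by
  induction L generalizing r with
  | nil => left; simp [pvF]
  | cons u L ih =>
    rw [pvF_cons]
    rcases ih (min r (pvRk u)) with h | ⟨t, ht, he⟩
    · rcases min_cases r (pvRk u) with ⟨he, _⟩ | ⟨he, _⟩
      · left; rw [h, he]
      · right; exact ⟨u, List.mem_cons_self, by rw [h, he]⟩
    · right; exact ⟨t, List.mem_cons_of_mem _ ht, he⟩

-- B's loop computes the running-minimum rank together with its label
lemma pvB_loop (fs : List (List (String × String))) (r : Int) (h0 : 0 ≤ r) (h4 : r ≤ 4) :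
    fs.foldl
      (fun best f =>
        match pvIndex.get? (PySem.Dict.getD (PySem.Dict.mk f) "target" "") with
        | some hit => if hit.1 < best.1 then hit else best
        | none => best)
      (r, pvLab r)
    = (pvF (fs.map pvTgt) r, pvLab (pvF (fs.map pvTgt) r)) := by
  have hfun : (fun (best : Int × String) (f : List (String × String)) =>
        match pvIndex.get? (PySem.Dict.getD (PySem.Dict.mk f) "target" "") with
        | some hit => if hit.1 < best.1 then hit else best
        | none => best)
      = (fun (best : Int × String) (f : List (String × String)) =>
        match pvIndex.get? (pvTgt f) with
        | some hit => if hit.1 < best.1 then hit else best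
        | none => best) := rfl
  rw [hfun]
  induction fs generalizing r with
  | nil => simp [pvF]
  | cons f fs ih =>
    simp only [List.foldl_cons, List.map_cons, pvF_cons]
    rcases hidx : pvIndex.get? (pvTgt f) with _ | hit
    · have h4' : ¬ pvRk (pvTgt f) < 4 := by
        have := pvIndex_get (pvTgt f); rw [hidx] at this
        by_contra hc; rw [if_pos hc] at this; simp at this
      rw [min_eq_left (by have := pvRk_le4 (pvTgt f); omega)]
      exact ih _ h0 h4
    · have hlt : pvRk (pvTgt f) < 4 := by
        have := pvIndex_get (pvTgt f); rw [hidx] at this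
        by_contra hc; rw [if_neg hc] at this; simp at this
      have hhit : hit = (pvRk (pvTgt f), pvLab (pvRk (pvTgt f))) := by
        have := pvIndex_get (pvTgt f); rw [hidx, if_pos hlt] at this
        exact Option.some_inj.mp this
      simp only [hhit]
      by_cases h2 : pvRk (pvTgt f) < r
      · simp only [if_pos h2]
        rw [min_eq_right (le_of_lt h2)]
        exact ih _ (pvRk_nonneg _) (pvRk_le4 _)
      · simp only [if_neg h2]
        rw [min_eq_left (by omega)]
        exact ih _ h0 h4

-- A's intersection test, as an existential over the fault targets
lemma pvA_cond (fs : List (List (String × String))) (u : List String) :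
    PySem.Set.inter
        (fs.foldl (fun s f => PySem.Set.add s (PySem.Dict.getD (PySem.Dict.mk f) "target" "")) PySem.Set.empty)
        u ≠ []
      ↔ ∃ x ∈ fs.map pvTgt, x ∈ u := by
  have hfun : (fun (s : PySem.Set String) (f : List (String × String)) =>
        PySem.Set.add s (PySem.Dict.getD (PySem.Dict.mk f) "target" ""))
      = (fun (s : PySem.Set String) (f : List (String × String)) => PySem.Set.add s (pvTgt f)) := rfl
  rw [hfun, ← PySem.Set.update_map_eq_foldl_add (f := pvTgt)]
  rw [Ne, List.eq_nil_iff_forall_not_mem]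
  push Not
  constructor
  · rintro ⟨x, hx⟩
    rcases (PySem.Set.mem_inter _ _ _).mp hx with ⟨hs, hu⟩
    rcases (PySem.Set.mem_update _ _ _).mp hs with h | h
    · cases h
    · exact ⟨x, h, hu⟩
  · rintro ⟨x, hL, hu⟩
    exact ⟨x, (PySem.Set.mem_inter _ _ _).mpr ⟨(PySem.Set.mem_update _ _ _).mpr (Or.inr hL), hu⟩⟩

-- ===== VERDICT (by name: the statement is the Claim_ definition above) =====
theorem infer_failure_domain_py_spec : Claim_equal_infer_failure_domain_py := by
  intro scenario _
  unfold Spec_infer_failure_domain_py infer_failure_domain_py infer_failure_domain_py_alt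
  set fs := PySem.Dict.getD (PySem.Dict.mk scenario) "faults" [] with hfs
  set L := fs.map pvTgt with hL
  rw [show (PySem.Set.ofList ["pcscf", "icscf", "scscf", "pyhss", "rtpengine"] : PySem.Set String) = ["pcscf", "icscf", "scscf", "pyhss", "rtpengine"] from rfl]
  rw [show (PySem.Set.ofList ["upf", "nr_gnb"] : PySem.Set String) = ["upf", "nr_gnb"] from rfl]
  rw [show (PySem.Set.ofList ["amf", "smf", "upf", "nrf", "scp", "ausf", "udm", "udr", "pcf"] : PySem.Set String) = ["amf", "smf", "upf", "nrf", "scp", "ausf", "udm", "udr", "pcf"] from rfl]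
  rw [show (PySem.Set.ofList ["mongo", "mysql", "dns"] : PySem.Set String) = ["mongo", "mysql", "dns"] from rfl]
  have hlab : pvLab ((pvTable.length : Int)) = "unknown" := by decide
  have hlen : (pvTable.length : Int) = 4 := by decide
  rw [show ((pvTable.length : Int), "unknown") = ((4 : Int), pvLab 4) from by decide]
  rw [pvB_loop fs 4 (by omega) (by omega)]
  simp only
  -- now: A's if-chain = pvLab (pvF L 4)
  have hle : pvF L 4 ≤ 4 := pvF_le_init _ _
  have hge : 0 ≤ pvF L 4 := pvF_nonneg _ _ (by omega)
  have hne : ∀ k : Int, pvF L 4 = k → k ≠ 4 → ∃ t ∈ L, pvRk t = k := by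
    intro k hk hk4
    rcases pvF_cases L 4 with h | ⟨t, ht, he⟩
    · omega
    · exact ⟨t, ht, by omega⟩
  by_cases c0 : ∃ x ∈ L, x ∈ ["pcscf", "icscf", "scscf", "pyhss", "rtpengine"]
  · rw [if_pos ((pvA_cond fs _).mpr c0)]
    obtain ⟨t, htL, hti⟩ := c0
    have h0 : pvRk t = 0 := pvRk0_of_ims t hti
    have := pvF_le_of_mem L 4 t htL
    have : pvF L 4 = 0 := by omega
    rw [this]; rfl
  · rw [if_neg (fun h => c0 ((pvA_cond fs _).mp h))]
    by_cases c1 : ∃ x ∈ L, x ∈ ["upf", "nr_gnb"]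
    · rw [if_pos ((pvA_cond fs _).mpr c1)]
      obtain ⟨t, htL, hti⟩ := c1
      have h1 : pvRk t = 1 := pvRk1_of_dp t hti
      have hub := pvF_le_of_mem L 4 t htL
      have hF0 : pvF L 4 ≠ 0 := by
        intro h
        obtain ⟨u, huL, hu⟩ := hne 0 h (by omega)
        exact c0 ⟨u, huL, pv_ims_of_rk0 u hu⟩
      have : pvF L 4 = 1 := by omega
      rw [this]; rfl
    · rw [if_neg (fun h => c1 ((pvA_cond fs _).mp h))]
      have hF0 : pvF L 4 ≠ 0 := by
        intro h
        obtain ⟨u, huL, hu⟩ := hne 0 h (by omega)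
        exact c0 ⟨u, huL, pv_ims_of_rk0 u hu⟩
      have hF1 : pvF L 4 ≠ 1 := by
        intro h
        obtain ⟨u, huL, hu⟩ := hne 1 h (by omega)
        exact c1 ⟨u, huL, pv_dp_of_rk1 u hu⟩
      by_cases c2 : ∃ x ∈ L, x ∈ ["amf", "smf", "upf", "nrf", "scp", "ausf", "udm", "udr", "pcf"]
      · rw [if_pos ((pvA_cond fs _).mpr c2)]
        obtain ⟨t, htL, hti⟩ := c2
        have h2 : pvRk t = 2 := by
          rcases pvRk_core t hti with h | h
          · exact absurd ⟨t, htL, pv_dp_of_rk1 t h⟩ c1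
          · exact h
        have hub := pvF_le_of_mem L 4 t htL
        have : pvF L 4 = 2 := by omega
        rw [this]; rfl
      · rw [if_neg (fun h => c2 ((pvA_cond fs _).mp h))]
        have hF2 : pvF L 4 ≠ 2 := by
          intro h
          obtain ⟨u, huL, hu⟩ := hne 2 h (by omega)
          exact c2 ⟨u, huL, pv_core_of_rk2 u hu⟩
        by_cases c3 : ∃ x ∈ L, x ∈ ["mongo", "mysql", "dns"]
        · rw [if_pos ((pvA_cond fs _).mpr c3)]
          obtain ⟨t, htL, hti⟩ := c3
          have h3 : pvRk t = 3 := pvRk3_of_data t hti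
          have hub := pvF_le_of_mem L 4 t htL
          have : pvF L 4 = 3 := by omega
          rw [this]; rfl
        · rw [if_neg (fun h => c3 ((pvA_cond fs _).mp h))]
          have hF3 : pvF L 4 ≠ 3 := by
            intro h
            obtain ⟨u, huL, hu⟩ := hne 3 h (by omega)
            exact c3 ⟨u, huL, pv_data_of_rk3 u hu⟩
          have : pvF L 4 = 4 := by omega
          rw [this]; rfl
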